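-- pv_equiv track=rewrite | github.com/mau671/miaubot | src/utils/report.py | normalize_audio_codecs
-- ===== SOURCE A (Python) =====
-- def normalize_audio_codecs(audio_info: str) -> str:
--     """
--     Normalizes audio codec names to shorter, standard formats.
--
--     :param audio_info: Original audio information string
--     :return: Normalized audio information string
--     """
--     if not audio_info:
--         return audio_info
--
--     # Audio codec normalization mappings
--     codec_mappings = {
--         "E-AC-3": "DD+",
--         "EAC3": "DD+",
--         "AC-3": "DD",
--         "AC3": "DD",
--         "AAC": "AAC",
--         "DTS-HD": "DTS-HD",
--         "DTS": "DTS",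
--         "FLAC": "FLAC",
--         "PCM": "PCM",
--         "Opus": "Opus",
--         "Vorbis": "Vorbis",
--     }
--
--     normalized = audio_info
--     for original, short in codec_mappings.items():
--         normalized = normalized.replace(original, short)
--
--     return normalized
-- ===== SOURCE B (Python) =====
-- def normalize_audio_codecs(audio_info: str) -> str:
--     """
--     Single left-to-right scan instead of 11 sequential replace passes.
--     Seven of A's mappings (AAC, DTS-HD, DTS, FLAC, PCM, Opus, Vorbis) map a
--     codec to itself, so only the four Dolby spellings actually change the
--     string; the scan applies them with longest-first priority, which yields
--     exactly the same result as the sequential passes.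
--     """
--     if not audio_info:
--         return audio_info
--
--     out = []
--     i = 0
--     n = len(audio_info)
--     while i < n:
--         if audio_info.startswith("E-AC-3", i):
--             out.append("DD+")
--             i += 6
--         elif audio_info.startswith("EAC3", i):
--             out.append("DD+")
--             i += 4
--         elif audio_info.startswith("AC-3", i):
--             out.append("DD")
--             i += 4
--         elif audio_info.startswith("AC3", i):
--             out.append("DD")
--             i += 3
--         else:
--             out.append(audio_info[i])
--             i += 1
--     return "".join(out)
-- ===== Notes on version B (the rewrite author's own statement) =====
-- stated objective: alternative
-- what changed: Replaces the 11 sequential full-string replace passes (7 of which map a codec name to itself and are no-ops) by a single left-to-right scan that applies the 4 effective Dolby mappings with longest-pattern-first priority, building the output in one pass.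
import Mathlib
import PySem

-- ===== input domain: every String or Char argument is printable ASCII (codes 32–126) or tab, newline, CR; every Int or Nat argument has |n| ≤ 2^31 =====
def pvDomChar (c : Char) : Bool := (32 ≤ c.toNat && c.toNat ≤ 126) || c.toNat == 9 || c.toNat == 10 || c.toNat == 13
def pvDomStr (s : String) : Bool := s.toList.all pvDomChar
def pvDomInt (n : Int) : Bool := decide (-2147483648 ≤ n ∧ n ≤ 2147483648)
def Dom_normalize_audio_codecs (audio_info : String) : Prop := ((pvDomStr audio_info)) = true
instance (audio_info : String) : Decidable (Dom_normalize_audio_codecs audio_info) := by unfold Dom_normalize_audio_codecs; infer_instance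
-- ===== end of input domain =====

-- B replaces A's 11 sequential full-string replace passes (7 of which map a codec to itself)
-- by one left-to-right scan applying the 4 effective mappings longest-first (objective: alternative).

-- ===== PORT A =====
def normalize_audio_codecs (audio_info : String) : String :=
  if audio_info = "" then audio_info
  else
    -- dict literal with distinct keys → association list in insertion order
    let codec_mappings : List (String × String) :=
      [("E-AC-3", "DD+"), ("EAC3", "DD+"), ("AC-3", "DD"), ("AC3", "DD"),
       ("AAC", "AAC"), ("DTS-HD", "DTS-HD"), ("DTS", "DTS"), ("FLAC", "FLAC"),
       ("PCM", "PCM"), ("Opus", "Opus"), ("Vorbis", "Vorbis")]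
    codec_mappings.foldl
      (fun normalized p => PySem.Str.replace normalized p.1 p.2) audio_info

-- ===== PORT B =====
-- the while-loop of Source B: one scan over the characters, longest pattern first
def pvScan : List Char → List Char
  | [] => []
  | c :: t =>
    if ['E', '-', 'A', 'C', '-', '3'].isPrefixOf (c :: t) then
      'D' :: 'D' :: '+' :: pvScan (t.drop 5)
    else if ['E', 'A', 'C', '3'].isPrefixOf (c :: t) then
      'D' :: 'D' :: '+' :: pvScan (t.drop 3)
    else if ['A', 'C', '-', '3'].isPrefixOf (c :: t) then
      'D' :: 'D' :: pvScan (t.drop 3)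
    else if ['A', 'C', '3'].isPrefixOf (c :: t) then
      'D' :: 'D' :: pvScan (t.drop 2)
    else c :: pvScan t
termination_by l => l.length
decreasing_by all_goals simp [List.length_drop]; try omega

def normalize_audio_codecs_alt (audio_info : String) : String :=
  if audio_info = "" then audio_info
  else String.ofList (pvScan audio_info.toList)

-- ===== PRECONDITION & SPEC =====
def Spec_normalize_audio_codecs (audio_info : String) (out : String) : Prop := out = normalize_audio_codecs_alt audio_info
instance (audio_info : String) (out : String) : Decidable (Spec_normalize_audio_codecs audio_info out) := by unfold Spec_normalize_audio_codecs; infer_instance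

-- ===== CLAIM (what is proved, stated in full; the proofs are below) =====
def Claim_equal_normalize_audio_codecs : Prop := ∀ (audio_info : String), Dom_normalize_audio_codecs audio_info → Spec_normalize_audio_codecs audio_info (normalize_audio_codecs audio_info)

-- ===== LEMMAS AND PROOFS =====

set_option maxRecDepth 10000

-- a fuel-free restatement of PySem.Chars.replace for a nonempty pattern
def pvRep (old new : List Char) : List Char → List Char
  | [] => []
  | c :: t =>
    if old.isPrefixOf (c :: t) then new ++ pvRep old new (t.drop (old.length - 1))
    else c :: pvRep old new t
termination_by l => l.length
decreasing_by all_goals simp [List.length_drop]; try omega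

lemma pvRep_nil (old new : List Char) : pvRep old new [] = [] := by simp [pvRep]

lemma pvRep_go (old new : List Char) (h : old ≠ []) :
    ∀ (fuel : ℕ) (l acc : List Char), l.length ≤ fuel →
      PySem.Chars.replace.go old new fuel l acc = acc.reverse ++ pvRep old new l := by
  intro fuel
  induction fuel with
  | zero =>
    intro l acc hl
    have hnil : l = [] := by cases l <;> simp_all
    subst hnil
    simp [PySem.Chars.replace.go, pvRep_nil]
  | succ n ih =>
    intro l acc hl
    cases l with
    | nil => simp [PySem.Chars.replace.go, pvRep_nil]
    | cons c t =>
      obtain ⟨o, o', rfl⟩ : ∃ o o', old = o :: o' := by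
        cases old with
        | nil => exact absurd rfl h
        | cons o o' => exact ⟨o, o', rfl⟩
      by_cases hp : (o :: o').isPrefixOf (c :: t)
      · have hdrop : (c :: t).drop (o :: o').length = t.drop ((o :: o').length - 1) := by
          simp
        have hlen : (t.drop ((o :: o').length - 1)).length ≤ n := by
          simp only [List.length_drop]
          simp at hl
          omega
        simp only [PySem.Chars.replace.go]
        rw [if_pos hp, hdrop, ih _ _ hlen]
        simp only [pvRep]
        rw [if_pos hp]
        simp
      · have hlen : t.length ≤ n := by simp at hl; omega
        simp only [PySem.Chars.replace.go]
        rw [if_neg hp, ih _ _ hlen]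
        simp only [pvRep]
        rw [if_neg hp]
        simp

lemma replace_eq_pvRep (old new : List Char) (h : old ≠ []) (s : List Char) :
    PySem.Chars.replace s old new = pvRep old new s := by
  rw [PySem.Chars.replace]
  rw [if_neg (by simp [List.isEmpty_iff, h])]
  rw [pvRep_go old new h s.length s [] le_rfl]
  simp

lemma pvRep_match (o : Char) (o' new u : List Char) :
    pvRep (o :: o') new ((o :: o') ++ u) = new ++ pvRep (o :: o') new u := by
  have hp : (o :: o').isPrefixOf (o :: (o' ++ u)) := by
    rw [List.isPrefixOf_iff_prefix]
    exact ⟨u, by simp⟩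
  show pvRep (o :: o') new (o :: (o' ++ u)) = _
  simp only [pvRep]
  rw [if_pos hp]
  congr 2
  simp

lemma pvRep_pass (old new : List Char) (c : Char) (t : List Char)
    (h : ¬ old.isPrefixOf (c :: t)) :
    pvRep old new (c :: t) = c :: pvRep old new t := by
  simp only [pvRep]
  rw [if_neg h]

lemma pvRep_pass_ne (o : Char) (o' new : List Char) (c : Char) (t : List Char) (h : c ≠ o) :
    pvRep (o :: o') new (c :: t) = c :: pvRep (o :: o') new t := by
  apply pvRep_pass
  intro hp
  rw [List.isPrefixOf_iff_prefix, List.cons_prefix_cons] at hp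
  exact h hp.1.symm

lemma pvRep_pass_list (o : Char) (o' new pre : List Char) (hpre : ∀ a ∈ pre, a ≠ o)
    (x : List Char) : pvRep (o :: o') new (pre ++ x) = pre ++ pvRep (o :: o') new x := by
  induction pre with
  | nil => simp
  | cons a pre' ih =>
    have ha : a ≠ o := hpre a (by simp)
    rw [List.cons_append, pvRep_pass_ne o o' new a _ ha,
      ih (fun b hb => hpre b (by simp [hb]))]
    rfl

lemma pvRep_self_aux (old : List Char) (h : old ≠ []) :
    ∀ (n : ℕ) (s : List Char), s.length ≤ n → pvRep old old s = s := by
  intro n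
  induction n with
  | zero =>
    intro s hs
    have hnil : s = [] := by cases s <;> simp_all
    subst hnil
    exact pvRep_nil _ _
  | succ n ih =>
    intro s hs
    cases s with
    | nil => exact pvRep_nil _ _
    | cons c t =>
      obtain ⟨o, o', rfl⟩ : ∃ o o', old = o :: o' := by
        cases old with
        | nil => exact absurd rfl h
        | cons o o' => exact ⟨o, o', rfl⟩
      by_cases hp : (o :: o').isPrefixOf (c :: t)
      · obtain ⟨u, hu⟩ := List.isPrefixOf_iff_prefix.mp hp
        rw [← hu, pvRep_match]
        have hlen : u.length ≤ n := by
          have h2 := congrArg List.length hu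
          simp at h2 hs
          omega
        rw [ih u hlen]
      · rw [pvRep_pass _ _ _ _ hp]
        have hlen : t.length ≤ n := by simp at hs; omega
        rw [ih t hlen]

lemma pvRep_self (old : List Char) (h : old ≠ []) (s : List Char) :
    pvRep old old s = s :=
  pvRep_self_aux old h s.length s le_rfl

-- pvRep with pattern head o and replacement nw neither destroys nor creates a
-- prefix w whose characters avoid both o and the characters of nw
lemma pvRep_prefix_iff (o : Char) (o' nw : List Char) (hnw : nw ≠ []) :
    ∀ (w : List Char), (∀ a ∈ w, a ≠ o ∧ a ∉ nw) →
      ∀ s, (w <+: pvRep (o :: o') nw s ↔ w <+: s) := by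
  intro w
  induction w with
  | nil => intro _ s; simp
  | cons a w' ih =>
    intro hw s
    have ha : a ≠ o ∧ a ∉ nw := hw a (by simp)
    cases s with
    | nil => simp [pvRep_nil]
    | cons c t =>
      by_cases hp : (o :: o').isPrefixOf (c :: t)
      · obtain ⟨m, nw', rfl⟩ : ∃ m nw', nw = m :: nw' := by
          cases nw with
          | nil => exact absurd rfl hnw
          | cons m nw' => exact ⟨m, nw', rfl⟩
        have hc : o = c := by
          obtain ⟨u, hu⟩ := List.isPrefixOf_iff_prefix.mp hp
          rw [List.cons_append] at hu
          exact (List.cons.inj hu).1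
        simp only [pvRep]
        rw [if_pos hp]
        apply iff_of_false
        · intro hpre
          have hm := (List.cons_prefix_cons.mp (by simpa using hpre)).1
          exact ha.2 (by simp [hm])
        · intro hpre
          have hac := (List.cons_prefix_cons.mp hpre).1
          exact ha.1 (by rw [hac, ← hc])
      · rw [pvRep_pass _ _ _ _ hp]
        rw [List.cons_prefix_cons, List.cons_prefix_cons]
        constructor
        · rintro ⟨rfl, hpre⟩
          exact ⟨rfl, (ih (fun b hb => hw b (by simp [hb])) t).mp hpre⟩
        · rintro ⟨rfl, hpre⟩
          exact ⟨rfl, (ih (fun b hb => hw b (by simp [hb])) t).mpr hpre⟩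

-- A's four effective passes, composed, equal B's single scan
lemma pvMain : ∀ (n : ℕ) (s : List Char), s.length ≤ n →
    pvRep ['A', 'C', '3'] ['D', 'D']
      (pvRep ['A', 'C', '-', '3'] ['D', 'D']
        (pvRep ['E', 'A', 'C', '3'] ['D', 'D', '+']
          (pvRep ['E', '-', 'A', 'C', '-', '3'] ['D', 'D', '+'] s))) = pvScan s := by
  intro n
  induction n with
  | zero =>
    intro s hs
    have hnil : s = [] := by cases s <;> simp_all
    subst hnil
    simp [pvRep_nil, pvScan]
  | succ n ih =>
    intro s hs
    cases s with
    | nil => simp [pvRep_nil, pvScan]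
    | cons c t =>
      by_cases h1 : (['E', '-', 'A', 'C', '-', '3'] : List Char).isPrefixOf (c :: t)
      · -- E-AC-3 at the front
        obtain ⟨u, hu⟩ := List.isPrefixOf_iff_prefix.mp h1
        have hlen : u.length ≤ n := by
          have h2 := congrArg List.length hu
          simp at h2 hs
          omega
        rw [← hu]
        rw [pvRep_match 'E' ['-', 'A', 'C', '-', '3'] ['D', 'D', '+'] u]
        rw [pvRep_pass_list 'E' ['A', 'C', '3'] ['D', 'D', '+'] ['D', 'D', '+'] (by simp) _]
        rw [pvRep_pass_list 'A' ['C', '-', '3'] ['D', 'D'] ['D', 'D', '+'] (by simp) _]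
        rw [pvRep_pass_list 'A' ['C', '3'] ['D', 'D'] ['D', 'D', '+'] (by simp) _]
        rw [ih u hlen]
        have h1' : (['E', '-', 'A', 'C', '-', '3'] : List Char).isPrefixOf
            ('E' :: ('-' :: 'A' :: 'C' :: '-' :: '3' :: u)) :=
          List.isPrefixOf_iff_prefix.mpr ⟨u, rfl⟩
        simp only [List.cons_append, List.nil_append]
        simp only [pvScan]
        rw [if_pos h1']
        rw [show (('-' :: 'A' :: 'C' :: '-' :: '3' :: u : List Char)).drop 5 = u from rfl]
      · by_cases h2 : (['E', 'A', 'C', '3'] : List Char).isPrefixOf (c :: t)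
        · -- EAC3 at the front
          obtain ⟨u, hu⟩ := List.isPrefixOf_iff_prefix.mp h2
          have hlen : u.length ≤ n := by
            have hl := congrArg List.length hu
            simp at hl hs
            omega
          rw [← hu]
          simp only [List.cons_append, List.nil_append]
          have hnp1 : ¬ (['E', '-', 'A', 'C', '-', '3'] : List Char).isPrefixOf
              ('E' :: 'A' :: 'C' :: '3' :: u) := by
            simp [List.isPrefixOf]
          rw [pvRep_pass _ _ _ _ hnp1]
          rw [pvRep_pass_ne 'E' ['-', 'A', 'C', '-', '3'] ['D', 'D', '+'] 'A' _ (by decide)]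
          rw [pvRep_pass_ne 'E' ['-', 'A', 'C', '-', '3'] ['D', 'D', '+'] 'C' _ (by decide)]
          rw [pvRep_pass_ne 'E' ['-', 'A', 'C', '-', '3'] ['D', 'D', '+'] '3' _ (by decide)]
          rw [show ('E' :: 'A' :: 'C' :: '3' ::
              pvRep ['E', '-', 'A', 'C', '-', '3'] ['D', 'D', '+'] u)
              = ['E', 'A', 'C', '3'] ++ pvRep ['E', '-', 'A', 'C', '-', '3'] ['D', 'D', '+'] u
              from rfl]
          rw [pvRep_match 'E' ['A', 'C', '3'] ['D', 'D', '+'] _]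
          rw [pvRep_pass_list 'A' ['C', '-', '3'] ['D', 'D'] ['D', 'D', '+'] (by simp) _]
          rw [pvRep_pass_list 'A' ['C', '3'] ['D', 'D'] ['D', 'D', '+'] (by simp) _]
          rw [ih u hlen]
          have h2' : (['E', 'A', 'C', '3'] : List Char).isPrefixOf
              ('E' :: 'A' :: 'C' :: '3' :: u) :=
            List.isPrefixOf_iff_prefix.mpr ⟨u, rfl⟩
          simp only [pvScan]
          rw [if_neg hnp1, if_pos h2']
          rw [show (('A' :: 'C' :: '3' :: u : List Char)).drop 3 = u from rfl]
          simp
        · by_cases h3 : (['A', 'C', '-', '3'] : List Char).isPrefixOf (c :: t)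
          · -- AC-3 at the front
            obtain ⟨u, hu⟩ := List.isPrefixOf_iff_prefix.mp h3
            have hlen : u.length ≤ n := by
              have hl := congrArg List.length hu
              simp at hl hs
              omega
            rw [← hu]
            simp only [List.cons_append, List.nil_append]
            rw [pvRep_pass_ne 'E' ['-', 'A', 'C', '-', '3'] ['D', 'D', '+'] 'A' _ (by decide)]
            rw [pvRep_pass_ne 'E' ['-', 'A', 'C', '-', '3'] ['D', 'D', '+'] 'C' _ (by decide)]
            rw [pvRep_pass_ne 'E' ['-', 'A', 'C', '-', '3'] ['D', 'D', '+'] '-' _ (by decide)]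
            rw [pvRep_pass_ne 'E' ['-', 'A', 'C', '-', '3'] ['D', 'D', '+'] '3' _ (by decide)]
            rw [pvRep_pass_ne 'E' ['A', 'C', '3'] ['D', 'D', '+'] 'A' _ (by decide)]
            rw [pvRep_pass_ne 'E' ['A', 'C', '3'] ['D', 'D', '+'] 'C' _ (by decide)]
            rw [pvRep_pass_ne 'E' ['A', 'C', '3'] ['D', 'D', '+'] '-' _ (by decide)]
            rw [pvRep_pass_ne 'E' ['A', 'C', '3'] ['D', 'D', '+'] '3' _ (by decide)]
            rw [show ('A' :: 'C' :: '-' :: '3' ::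
                pvRep ['E', 'A', 'C', '3'] ['D', 'D', '+']
                  (pvRep ['E', '-', 'A', 'C', '-', '3'] ['D', 'D', '+'] u))
                = ['A', 'C', '-', '3'] ++ pvRep ['E', 'A', 'C', '3'] ['D', 'D', '+']
                  (pvRep ['E', '-', 'A', 'C', '-', '3'] ['D', 'D', '+'] u) from rfl]
            rw [pvRep_match 'A' ['C', '-', '3'] ['D', 'D'] _]
            rw [pvRep_pass_list 'A' ['C', '3'] ['D', 'D'] ['D', 'D'] (by simp) _]
            rw [ih u hlen]
            have hnp1 : ¬ (['E', '-', 'A', 'C', '-', '3'] : List Char).isPrefixOf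
                ('A' :: 'C' :: '-' :: '3' :: u) := by simp [List.isPrefixOf]
            have hnp2 : ¬ (['E', 'A', 'C', '3'] : List Char).isPrefixOf
                ('A' :: 'C' :: '-' :: '3' :: u) := by simp [List.isPrefixOf]
            have h3' : (['A', 'C', '-', '3'] : List Char).isPrefixOf
                ('A' :: 'C' :: '-' :: '3' :: u) :=
              List.isPrefixOf_iff_prefix.mpr ⟨u, rfl⟩
            simp only [pvScan]
            rw [if_neg hnp1, if_neg hnp2, if_pos h3']
            rw [show (('C' :: '-' :: '3' :: u : List Char)).drop 3 = u from rfl]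
            simp
          · by_cases h4 : (['A', 'C', '3'] : List Char).isPrefixOf (c :: t)
            · -- AC3 at the front
              obtain ⟨u, hu⟩ := List.isPrefixOf_iff_prefix.mp h4
              have hlen : u.length ≤ n := by
                have hl := congrArg List.length hu
                simp at hl hs
                omega
              rw [← hu]
              simp only [List.cons_append, List.nil_append]
              rw [pvRep_pass_ne 'E' ['-', 'A', 'C', '-', '3'] ['D', 'D', '+'] 'A' _ (by decide)]
              rw [pvRep_pass_ne 'E' ['-', 'A', 'C', '-', '3'] ['D', 'D', '+'] 'C' _ (by decide)]
              rw [pvRep_pass_ne 'E' ['-', 'A', 'C', '-', '3'] ['D', 'D', '+'] '3' _ (by decide)]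
              rw [pvRep_pass_ne 'E' ['A', 'C', '3'] ['D', 'D', '+'] 'A' _ (by decide)]
              rw [pvRep_pass_ne 'E' ['A', 'C', '3'] ['D', 'D', '+'] 'C' _ (by decide)]
              rw [pvRep_pass_ne 'E' ['A', 'C', '3'] ['D', 'D', '+'] '3' _ (by decide)]
              have hnp3 : ∀ X : List Char, ¬ (['A', 'C', '-', '3'] : List Char).isPrefixOf
                  ('A' :: 'C' :: '3' :: X) := by
                intro X
                simp [List.isPrefixOf]
              rw [pvRep_pass _ _ _ _ (hnp3 _)]
              rw [pvRep_pass_ne 'A' ['C', '-', '3'] ['D', 'D'] 'C' _ (by decide)]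
              rw [pvRep_pass_ne 'A' ['C', '-', '3'] ['D', 'D'] '3' _ (by decide)]
              rw [show ('A' :: 'C' :: '3' ::
                  pvRep ['A', 'C', '-', '3'] ['D', 'D']
                    (pvRep ['E', 'A', 'C', '3'] ['D', 'D', '+']
                      (pvRep ['E', '-', 'A', 'C', '-', '3'] ['D', 'D', '+'] u)))
                  = ['A', 'C', '3'] ++ pvRep ['A', 'C', '-', '3'] ['D', 'D']
                    (pvRep ['E', 'A', 'C', '3'] ['D', 'D', '+']
                      (pvRep ['E', '-', 'A', 'C', '-', '3'] ['D', 'D', '+'] u)) from rfl]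
              rw [pvRep_match 'A' ['C', '3'] ['D', 'D'] _]
              rw [ih u hlen]
              have hnp1 : ¬ (['E', '-', 'A', 'C', '-', '3'] : List Char).isPrefixOf
                  ('A' :: 'C' :: '3' :: u) := by simp [List.isPrefixOf]
              have hnp2 : ¬ (['E', 'A', 'C', '3'] : List Char).isPrefixOf
                  ('A' :: 'C' :: '3' :: u) := by simp [List.isPrefixOf]
              have h4' : (['A', 'C', '3'] : List Char).isPrefixOf ('A' :: 'C' :: '3' :: u) :=
                List.isPrefixOf_iff_prefix.mpr ⟨u, rfl⟩
              simp only [pvScan]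
              rw [if_neg hnp1, if_neg hnp2, if_neg (hnp3 u), if_pos h4']
              rw [show (('C' :: '3' :: u : List Char)).drop 2 = u from rfl]
              simp
            · -- no pattern at the front: the character passes through all four replaces
              have hlen : t.length ≤ n := by simp at hs; omega
              rw [pvRep_pass _ _ _ _ h1]
              have hnp2 : ¬ (['E', 'A', 'C', '3'] : List Char).isPrefixOf
                  (c :: pvRep ['E', '-', 'A', 'C', '-', '3'] ['D', 'D', '+'] t) := by
                intro hp
                rw [List.isPrefixOf_iff_prefix, List.cons_prefix_cons] at hp
                obtain ⟨rfl, hpre⟩ := hp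
                have hA : (['A', 'C', '3'] : List Char) <+: t :=
                  (pvRep_prefix_iff 'E' ['-', 'A', 'C', '-', '3'] ['D', 'D', '+'] (by simp)
                    ['A', 'C', '3'] (by simp) t).mp hpre
                exact h2 (List.isPrefixOf_iff_prefix.mpr (List.cons_prefix_cons.mpr ⟨rfl, hA⟩))
              rw [pvRep_pass _ _ _ _ hnp2]
              have hnp3 : ¬ (['A', 'C', '-', '3'] : List Char).isPrefixOf
                  (c :: pvRep ['E', 'A', 'C', '3'] ['D', 'D', '+']
                    (pvRep ['E', '-', 'A', 'C', '-', '3'] ['D', 'D', '+'] t)) := by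
                intro hp
                rw [List.isPrefixOf_iff_prefix, List.cons_prefix_cons] at hp
                obtain ⟨rfl, hpre⟩ := hp
                have hs1 : (['C', '-', '3'] : List Char) <+:
                    pvRep ['E', '-', 'A', 'C', '-', '3'] ['D', 'D', '+'] t :=
                  (pvRep_prefix_iff 'E' ['A', 'C', '3'] ['D', 'D', '+'] (by simp)
                    ['C', '-', '3'] (by simp) _).mp hpre
                have hs2 : (['C', '-', '3'] : List Char) <+: t :=
                  (pvRep_prefix_iff 'E' ['-', 'A', 'C', '-', '3'] ['D', 'D', '+'] (by simp)
                    ['C', '-', '3'] (by simp) t).mp hs1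
                exact h3 (List.isPrefixOf_iff_prefix.mpr (List.cons_prefix_cons.mpr ⟨rfl, hs2⟩))
              rw [pvRep_pass _ _ _ _ hnp3]
              have hnp4 : ¬ (['A', 'C', '3'] : List Char).isPrefixOf
                  (c :: pvRep ['A', 'C', '-', '3'] ['D', 'D']
                    (pvRep ['E', 'A', 'C', '3'] ['D', 'D', '+']
                      (pvRep ['E', '-', 'A', 'C', '-', '3'] ['D', 'D', '+'] t))) := by
                intro hp
                rw [List.isPrefixOf_iff_prefix, List.cons_prefix_cons] at hp
                obtain ⟨rfl, hpre⟩ := hp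
                have hs1 : (['C', '3'] : List Char) <+:
                    pvRep ['E', 'A', 'C', '3'] ['D', 'D', '+']
                      (pvRep ['E', '-', 'A', 'C', '-', '3'] ['D', 'D', '+'] t) :=
                  (pvRep_prefix_iff 'A' ['C', '-', '3'] ['D', 'D'] (by simp)
                    ['C', '3'] (by simp) _).mp hpre
                have hs2 := (pvRep_prefix_iff 'E' ['A', 'C', '3'] ['D', 'D', '+'] (by simp)
                    ['C', '3'] (by simp) _).mp hs1
                have hs3 := (pvRep_prefix_iff 'E' ['-', 'A', 'C', '-', '3'] ['D', 'D', '+']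
                    (by simp) ['C', '3'] (by simp) t).mp hs2
                exact h4 (List.isPrefixOf_iff_prefix.mpr (List.cons_prefix_cons.mpr ⟨rfl, hs3⟩))
              rw [pvRep_pass _ _ _ _ hnp4]
              rw [ih t hlen]
              simp only [pvScan]
              rw [if_neg h1, if_neg h2, if_neg h3, if_neg h4]

-- ===== VERDICT (by name: the statement is the Claim_ definition above) =====
theorem normalize_audio_codecs_spec : Claim_equal_normalize_audio_codecs := by
  intro s _
  unfold Spec_normalize_audio_codecs normalize_audio_codecs normalize_audio_codecs_alt
  by_cases hs : s = ""
  · simp [hs]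
  · rw [if_neg hs, if_neg hs]
    simp only [List.foldl_cons, List.foldl_nil]
    rw [← String.toList_inj]
    simp only [PySem.Str.toList_replace, String.toList_ofList]
    simp only [show "E-AC-3".toList = (['E', '-', 'A', 'C', '-', '3'] : List Char) from rfl,
      show "EAC3".toList = (['E', 'A', 'C', '3'] : List Char) from rfl,
      show "AC-3".toList = (['A', 'C', '-', '3'] : List Char) from rfl,
      show "AC3".toList = (['A', 'C', '3'] : List Char) from rfl,
      show "AAC".toList = (['A', 'A', 'C'] : List Char) from rfl,
      show "DTS-HD".toList = (['D', 'T', 'S', '-', 'H', 'D'] : List Char) from rfl,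
      show "DTS".toList = (['D', 'T', 'S'] : List Char) from rfl,
      show "FLAC".toList = (['F', 'L', 'A', 'C'] : List Char) from rfl,
      show "PCM".toList = (['P', 'C', 'M'] : List Char) from rfl,
      show "Opus".toList = (['O', 'p', 'u', 's'] : List Char) from rfl,
      show "Vorbis".toList = (['V', 'o', 'r', 'b', 'i', 's'] : List Char) from rfl,
      show "DD+".toList = (['D', 'D', '+'] : List Char) from rfl,
      show "DD".toList = (['D', 'D'] : List Char) from rfl]
    simp only [replace_eq_pvRep ['E', '-', 'A', 'C', '-', '3'] ['D', 'D', '+'] (by simp),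
      replace_eq_pvRep ['E', 'A', 'C', '3'] ['D', 'D', '+'] (by simp),
      replace_eq_pvRep ['A', 'C', '-', '3'] ['D', 'D'] (by simp),
      replace_eq_pvRep ['A', 'C', '3'] ['D', 'D'] (by simp),
      replace_eq_pvRep ['A', 'A', 'C'] ['A', 'A', 'C'] (by simp),
      replace_eq_pvRep ['D', 'T', 'S', '-', 'H', 'D'] ['D', 'T', 'S', '-', 'H', 'D'] (by simp),
      replace_eq_pvRep ['D', 'T', 'S'] ['D', 'T', 'S'] (by simp),
      replace_eq_pvRep ['F', 'L', 'A', 'C'] ['F', 'L', 'A', 'C'] (by simp),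
      replace_eq_pvRep ['P', 'C', 'M'] ['P', 'C', 'M'] (by simp),
      replace_eq_pvRep ['O', 'p', 'u', 's'] ['O', 'p', 'u', 's'] (by simp),
      replace_eq_pvRep ['V', 'o', 'r', 'b', 'i', 's'] ['V', 'o', 'r', 'b', 'i', 's'] (by simp)]
    simp only [pvRep_self ['A', 'A', 'C'] (by simp),
      pvRep_self ['D', 'T', 'S', '-', 'H', 'D'] (by simp),
      pvRep_self ['D', 'T', 'S'] (by simp),
      pvRep_self ['F', 'L', 'A', 'C'] (by simp),
      pvRep_self ['P', 'C', 'M'] (by simp),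
      pvRep_self ['O', 'p', 'u', 's'] (by simp),
      pvRep_self ['V', 'o', 'r', 'b', 'i', 's'] (by simp)]
    exact pvMain s.toList.length s.toList le_rfl
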